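-- pv_equiv track=rewrite | github.com/minal540/missing-number-series | series.py | detect_arithmetic
-- ===== SOURCE A (Python) =====
-- def detect_arithmetic(series):
--     diffs = []
--     for i in range(1, len(series)):
--         if series[i] is not None and series[i - 1] is not None:
--             diffs.append(series[i] - series[i - 1])
--     if len(set(diffs)) == 1:
--         return ("Arithmetic", diffs[0])
--     return None
-- ===== SOURCE B (Python) =====
-- def detect_arithmetic(series):
--     # Split the series at None into maximal runs of consecutive integers,
--     # take the candidate difference from the first run of length >= 2, and
--     # verify each such run equals the arithmetic progression it would generate.
--     runs = []
--     cur = []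
--     for x in series:
--         if x is None:
--             if cur:
--                 runs.append(cur)
--             cur = []
--         else:
--             cur.append(x)
--     if cur:
--         runs.append(cur)
--     runs = [r for r in runs if len(r) >= 2]
--     if not runs:
--         return None
--     d = runs[0][1] - runs[0][0]
--     for r in runs:
--         if r != [r[0] + k * d for k in range(len(r))]:
--             return None
--     return ("Arithmetic", d)
-- ===== Notes on version B (the rewrite author's own statement) =====
-- stated objective: alternative
-- what changed: Instead of A's index loop collecting all adjacent differences and testing len(set(diffs))==1, B splits the series at None into maximal integer runs, takes the candidate difference from the first run of length >= 2, and checks each such run equals the arithmetic progression it would generate. (fewer per-element Python operations: no per-pair list append/set build).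
import Mathlib
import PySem

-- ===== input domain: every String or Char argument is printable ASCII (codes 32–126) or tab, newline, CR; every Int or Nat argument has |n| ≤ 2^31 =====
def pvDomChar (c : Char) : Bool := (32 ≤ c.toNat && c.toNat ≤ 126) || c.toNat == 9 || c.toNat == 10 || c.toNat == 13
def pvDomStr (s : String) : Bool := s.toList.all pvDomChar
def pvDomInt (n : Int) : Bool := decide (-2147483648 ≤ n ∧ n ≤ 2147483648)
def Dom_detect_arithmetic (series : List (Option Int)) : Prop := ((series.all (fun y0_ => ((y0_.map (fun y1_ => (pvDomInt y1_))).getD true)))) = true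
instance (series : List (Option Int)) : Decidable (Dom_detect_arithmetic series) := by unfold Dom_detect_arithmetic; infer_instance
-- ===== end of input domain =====

-- B replaces A's diff-collecting index loop + len(set(..))==1 test by a different algorithm:
-- split the series at None into maximal runs, take the candidate difference from the first
-- run of length >= 2, and verify each such run equals the arithmetic progression it generates
-- (objective: alternative decomposition, same O(n) cost).

-- ===== PORT A =====
-- loop body of 'for i in range(1, len(series)): if series[i] is not None and series[i-1] is not None: diffs.append(...)'
def pvStepA (series : List (Option Int)) (acc : List Int) (i : Int) : List Int :=
  match PySem.List.pyGetD series i none, PySem.List.pyGetD series (i - 1) none with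
  | some a, some b => acc ++ [a - b]
  | _, _ => acc

def detect_arithmetic (series : List (Option Int)) : Option (String × Int) :=
  let diffs := (PySem.List.pyRange 1 series.length 1).foldl (pvStepA series) []
  if (PySem.Set.ofList diffs).length = 1 then
    -- diffs[0]: only reached with diffs nonempty (set has an element), so total pyGetD is exact
    some ("Arithmetic", PySem.List.pyGetD diffs 0 0)
  else
    none

-- ===== PORT B =====
-- 'for x in series: …' splitting into maximal runs of non-None values (runs / cur accumulators)
def pvSplitGo : List (Option Int) → List (List Int) → List Int → List (List Int)
  | [], runs, cur => if cur.isEmpty then runs else runs ++ [cur]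
  | x :: t, runs, cur =>
    match x with
    | none => pvSplitGo t (if cur.isEmpty then runs else runs ++ [cur]) []
    | some v => pvSplitGo t runs (cur ++ [v])

-- '[r[0] + k * d for k in range(len(r))]'
def pvAP (r : List Int) (d : Int) : List Int :=
  (PySem.List.pyRange 0 (r.length : Int) 1).map (fun k => PySem.List.pyGetD r 0 0 + k * d)

-- 'for r in runs: if r != [...]: return None' then 'return ("Arithmetic", d)'
def pvCheckB (d : Int) : List (List Int) → Option (String × Int)
  | [] => some ("Arithmetic", d)
  | r :: rs => if r ≠ pvAP r d then none else pvCheckB d rs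

def detect_arithmetic_alt (series : List (Option Int)) : Option (String × Int) :=
  let runs := (pvSplitGo series [] []).filter (fun r => 2 ≤ r.length)
  match runs with
  | [] => none
  | r0 :: _ =>
    let d := PySem.List.pyGetD r0 1 0 - PySem.List.pyGetD r0 0 0
    pvCheckB d runs

-- ===== PRECONDITION & SPEC =====
def Spec_detect_arithmetic (series : List (Option Int)) (out : Option (String × Int)) : Prop := out = detect_arithmetic_alt series
instance (series : List (Option Int)) (out : Option (String × Int)) : Decidable (Spec_detect_arithmetic series out) := by unfold Spec_detect_arithmetic; infer_instance

-- ===== CLAIM (what is proved, stated in full; the proofs are below) =====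
def Claim_equal_detect_arithmetic : Prop := ∀ (series : List (Option Int)), Dom_detect_arithmetic series → Spec_detect_arithmetic series (detect_arithmetic series)

-- ===== LEMMAS AND PROOFS =====

-- the list of consecutive differences over adjacent non-None pairs
def pvDiffs : List (Option Int) → List Int
  | x :: t =>
    (match t with
     | [] => []
     | y :: _ =>
       match x, y with
       | some a, some b => (b - a) :: pvDiffs t
       | _, _ => pvDiffs t)
  | [] => []

-- consecutive differences of a run of plain ints
def pvRunDiffs : List Int → List Int
  | a :: b :: t => (b - a) :: pvRunDiffs (b :: t)
  | _ => []

-- the common value both programs compute from the difference list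
def pvF : List Int → Option (String × Int)
  | [] => none
  | d :: ds => if ds.all (· == d) then some ("Arithmetic", d) else none

-- ---------- A = pvF ∘ pvDiffs ----------

lemma pvStepA_shift (x : Option Int) (xs : List (Option Int)) (a b : Int) (ha : 1 ≤ a)
    (acc : List Int) :
    (PySem.List.pyRange (a + 1) (b + 1) 1).foldl (pvStepA (x :: xs)) acc
      = (PySem.List.pyRange a b 1).foldl (pvStepA xs) acc := by
  rw [PySem.List.pyRange_one a b, PySem.List.pyRange_one (a+1) (b+1)]
  have hlen : (b + 1 - (a + 1)).toNat = (b - a).toNat := by omega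
  rw [hlen]
  rw [List.foldl_map, List.foldl_map]
  apply PySem.List.foldl_congr_mem
  intro acc' k hk
  have hk' : (0:Int) ≤ (k:Int) := Int.natCast_nonneg k
  have h1 : PySem.List.pyGetD (x :: xs) (a + 1 + k) none = PySem.List.pyGetD xs (a + k) none := by
    rw [PySem.List.pyGetD_of_nonneg _ _ (by omega), PySem.List.pyGetD_of_nonneg _ _ (by omega)]
    have : (a + 1 + (k:Int)).toNat = (a + (k:Int)).toNat + 1 := by omega
    rw [this]; rfl
  have h2 : PySem.List.pyGetD (x :: xs) (a + 1 + k - 1) none = PySem.List.pyGetD xs (a + k - 1) none := by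
    rw [PySem.List.pyGetD_of_nonneg _ _ (by omega), PySem.List.pyGetD_of_nonneg _ _ (by omega)]
    have : (a + 1 + (k:Int) - 1).toNat = (a + (k:Int) - 1).toNat + 1 := by omega
    rw [this]; rfl
  simp [pvStepA, h1, h2]

lemma foldA_eq_pvDiffs : ∀ (xs : List (Option Int)) (acc : List Int),
    (PySem.List.pyRange 1 xs.length 1).foldl (pvStepA xs) acc = acc ++ pvDiffs xs
  | [], acc => by
      rw [PySem.List.pyRange_one_eq_nil (by simp)]; simp [pvDiffs]
  | [x], acc => by
      rw [PySem.List.pyRange_one_eq_nil (by simp)]; simp [pvDiffs]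
  | x :: y :: zs, acc => by
      have hlen : ((x :: y :: zs).length : Int) = (zs.length : Int) + 2 := by
        simp; omega
      rw [hlen]
      rw [PySem.List.pyRange_one_cons (by omega)]
      simp only [List.foldl_cons]
      have hstep : pvStepA (x :: y :: zs) acc 1 =
          acc ++ (match x, y with | some a, some b => [b - a] | _, _ => []) := by
        cases x <;> cases y <;> simp [pvStepA, PySem.List.pyGetD]
      have hshift := pvStepA_shift x (y :: zs) 1 ((zs.length : Int) + 1) (le_refl 1)
        (pvStepA (x :: y :: zs) acc 1)
      have h11 : (1:Int) + 1 = 2 := by norm_num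
      have h22 : ((zs.length:Int) + 1) + 1 = (zs.length:Int) + 2 := by ring
      rw [h11, h22] at hshift
      rw [h11, hshift]
      have hlen2 : ((y :: zs).length : Int) = (zs.length : Int) + 1 := by simp
      have := foldA_eq_pvDiffs (y :: zs) (pvStepA (x :: y :: zs) acc 1)
      rw [hlen2] at this
      rw [this, hstep]
      cases x <;> cases y <;> simp [pvDiffs]

lemma length_le_setAdd (s : PySem.Set Int) (x : Int) : s.length ≤ (PySem.Set.add s x).length := by
  unfold PySem.Set.add
  split <;> simp

lemma length_le_foldl_add : ∀ (ds : List Int) (t : PySem.Set Int),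
    t.length ≤ (ds.foldl PySem.Set.add t).length
  | [], _ => le_refl _
  | d :: ds, t =>
    le_trans (length_le_setAdd t d) (length_le_foldl_add ds (PySem.Set.add t d))

lemma setLen_single : ∀ (ds : List Int) (d : Int),
    ((ds.foldl PySem.Set.add [d]).length = 1) ↔ ds.all (· == d)
  | [], d => by simp
  | e :: ds, d => by
    by_cases h : e = d
    · subst h
      have : PySem.Set.add [e] e = [e] := by simp [PySem.Set.add, PySem.Set.contains]
      simp only [List.foldl_cons, this, List.all_cons, beq_self_eq_true, Bool.true_and]
      exact setLen_single ds e
    · have hadd : PySem.Set.add [d] e = [d, e] := by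
        simp [PySem.Set.add, PySem.Set.contains, h]
      simp only [List.foldl_cons, hadd, List.all_cons]
      constructor
      · intro hlen
        have := length_le_foldl_add ds [d, e]
        simp at this; omega
      · intro hall
        simp [h] at hall

lemma A_eq_F (series : List (Option Int)) :
    detect_arithmetic series = pvF (pvDiffs series) := by
  simp only [detect_arithmetic, foldA_eq_pvDiffs, List.nil_append]
  cases h : pvDiffs series with
  | nil => simp [PySem.Set.ofList, pvF]
  | cons d ds =>
    have hset : PySem.Set.ofList (d :: ds) = ds.foldl PySem.Set.add [d] := by
      simp [PySem.Set.ofList_eq_foldl, PySem.Set.add, PySem.Set.contains]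
    rw [hset]
    by_cases hall : ds.all (· == d)
    · simp [pvF, (setLen_single ds d).mpr hall, hall, PySem.List.pyGetD]
    · have : ¬ (ds.foldl PySem.Set.add [d]).length = 1 := fun hc => hall ((setLen_single ds d).mp hc)
      simp [pvF, this, hall]

-- ---------- B = pvF ∘ pvDiffs ----------

lemma pvSplitGo_acc : ∀ (xs : List (Option Int)) (runs : List (List Int)) (cur : List Int),
    pvSplitGo xs runs cur = runs ++ pvSplitGo xs [] cur
  | [], runs, cur => by cases cur <;> simp [pvSplitGo]
  | x :: t, runs, cur => by
    cases x with
    | none =>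
      have hR : pvSplitGo (none :: t) [] cur = pvSplitGo t (if cur.isEmpty then [] else [cur]) [] := rfl
      show pvSplitGo t (if cur.isEmpty then runs else runs ++ [cur]) [] = runs ++ pvSplitGo (none :: t) [] cur
      rw [hR, pvSplitGo_acc t (if cur.isEmpty then runs else runs ++ [cur]) [],
        pvSplitGo_acc t (if cur.isEmpty then [] else [cur]) []]
      cases cur <;> simp
    | some v =>
      show pvSplitGo t runs (cur ++ [v]) = _
      rw [pvSplitGo_acc t runs (cur ++ [v])]; rfl

lemma pvDiffs_map_some : ∀ (cur : List Int), pvDiffs (cur.map some) = pvRunDiffs cur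
  | [] => rfl
  | [_] => rfl
  | a :: b :: t => by
    show (b - a) :: pvDiffs ((b :: t).map some) = (b - a) :: pvRunDiffs (b :: t)
    rw [pvDiffs_map_some (b :: t)]

lemma pvDiffs_none_cons (t : List (Option Int)) : pvDiffs (none :: t) = pvDiffs t := by
  cases t with
  | nil => rfl
  | cons y t' => cases y <;> rfl

lemma pvDiffs_map_some_none : ∀ (cur : List Int) (t : List (Option Int)),
    pvDiffs (cur.map some ++ none :: t) = pvRunDiffs cur ++ pvDiffs t
  | [], t => by simpa using pvDiffs_none_cons t
  | [a], t => by simpa using pvDiffs_none_cons t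
  | a :: b :: cur', t => by
    show (b - a) :: pvDiffs ((b :: cur').map some ++ none :: t)
        = (b - a) :: (pvRunDiffs (b :: cur') ++ pvDiffs t)
    rw [pvDiffs_map_some_none (b :: cur') t]

lemma splitGo_flatMap : ∀ (xs : List (Option Int)) (cur : List Int),
    (pvSplitGo xs [] cur).flatMap pvRunDiffs = pvDiffs (cur.map some ++ xs)
  | [], cur => by
    cases cur with
    | nil => rfl
    | cons a c => simpa [pvSplitGo] using (pvDiffs_map_some (a :: c)).symm
  | none :: t, cur => by
    show ((pvSplitGo t (if cur.isEmpty then [] else [cur]) []).flatMap pvRunDiffs) = _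
    rw [pvSplitGo_acc t _ [], List.flatMap_append, splitGo_flatMap t []]
    cases cur with
    | nil => simpa using (pvDiffs_none_cons t).symm
    | cons a c => simpa using (pvDiffs_map_some_none (a :: c) t).symm
  | some v :: t, cur => by
    show (pvSplitGo t [] (cur ++ [v])).flatMap pvRunDiffs = _
    rw [splitGo_flatMap t (cur ++ [v])]
    simp

lemma pvRunDiffs_short (r : List Int) (h : r.length < 2) : pvRunDiffs r = [] := by
  match r, h with
  | [], _ => rfl
  | [_], _ => rfl

lemma flatMap_filter_runDiffs : ∀ (runs : List (List Int)),
    (runs.filter (fun r => 2 ≤ r.length)).flatMap pvRunDiffs = runs.flatMap pvRunDiffs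
  | [] => rfl
  | r :: rs => by
    by_cases h : 2 ≤ r.length
    · simp [h, flatMap_filter_runDiffs rs]
    · simp [h, flatMap_filter_runDiffs rs,
        pvRunDiffs_short r (by omega)]

-- a run equals the arithmetic progression it generates iff all its consecutive diffs are d
lemma ap_core (d : Int) : ∀ (t : List Int) (a : Int),
    (a :: t = (List.range (t.length + 1)).map (fun (k : Nat) => a + (k : Int) * d))
      ↔ (pvRunDiffs (a :: t)).all (· == d) = true
  | [], a => by simp [pvRunDiffs]
  | b :: t', a => by
    have hshift : (List.range (t'.length + 1 + 1)).map (fun (k : Nat) => a + (k : Int) * d)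
        = a :: (List.range (t'.length + 1)).map (fun (k : Nat) => (a + d) + (k : Int) * d) := by
      rw [List.range_succ_eq_map, List.map_cons, List.map_map]
      refine congrArg₂ _ (by push_cast; ring) (List.map_congr_left ?_)
      intro k _
      simp only [Function.comp_apply]
      push_cast; ring
    simp only [List.length_cons]
    rw [hshift, List.cons.injEq]
    by_cases h : b = a + d
    · subst h
      simp only [true_and]
      rw [ap_core d t' (a + d)]
      simp [pvRunDiffs, add_sub_cancel_left]
    · apply iff_of_false
      · rintro ⟨-, he⟩
        rw [List.range_succ_eq_map, List.map_cons] at he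
        injection he with h1
        simp only [Nat.cast_zero, zero_mul, add_zero] at h1
        exact h h1
      · intro hall
        simp only [pvRunDiffs, List.all_cons, Bool.and_eq_true, beq_iff_eq] at hall
        omega

lemma ap_iff (r : List Int) (d : Int) :
    (r = pvAP r d) ↔ (pvRunDiffs r).all (· == d) = true := by
  cases r with
  | nil => simp [pvAP, PySem.List.pyRange_one_eq_nil, pvRunDiffs]
  | cons a t =>
    have hr : pvAP (a :: t) d
        = (List.range (t.length + 1)).map (fun (k : Nat) => a + (k : Int) * d) := by
      unfold pvAP
      have h : ((a :: t).length : Int) = ((t.length + 1 : Nat) : Int) := by simp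
      rw [h, PySem.List.pyRange_zero_natCast, List.map_map]
      simp [PySem.List.pyGetD, Function.comp_def]
    rw [hr]
    exact ap_core d t a

lemma pvCheckB_eq (d : Int) : ∀ (rs : List (List Int)),
    pvCheckB d rs = if rs.all (fun r => decide (r = pvAP r d)) then some ("Arithmetic", d) else none
  | [] => rfl
  | r :: rs => by
    by_cases h : r = pvAP r d
    · rw [show pvCheckB d (r :: rs) = pvCheckB d rs from if_neg (by simpa using h),
        pvCheckB_eq d rs, List.all_cons, decide_eq_true h, Bool.true_and]
    · rw [show pvCheckB d (r :: rs) = none from if_pos (by simpa using h),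
        List.all_cons, decide_eq_false h, Bool.false_and, if_neg (by simp)]

lemma B_eq_F (series : List (Option Int)) :
    detect_arithmetic_alt series = pvF (pvDiffs series) := by
  unfold detect_arithmetic_alt
  have hd : pvDiffs series
      = ((pvSplitGo series [] []).filter (fun r => 2 ≤ r.length)).flatMap pvRunDiffs := by
    rw [flatMap_filter_runDiffs, splitGo_flatMap series []]; rfl
  cases hruns : (pvSplitGo series [] []).filter (fun r => 2 ≤ r.length) with
  | nil => simp [hd, hruns, pvF]
  | cons r0 rs =>
    have hr0len : 2 ≤ r0.length := by
      have : r0 ∈ (pvSplitGo series [] []).filter (fun r => 2 ≤ r.length) := by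
        rw [hruns]; exact List.mem_cons_self
      simpa using (List.of_mem_filter this)
    match r0, hr0len with
    | a :: b :: t, _ =>
      have hdval : PySem.List.pyGetD (a :: b :: t) 1 0 - PySem.List.pyGetD (a :: b :: t) 0 0 = b - a := by
        simp [PySem.List.pyGetD]
      show pvCheckB (PySem.List.pyGetD (a :: b :: t) 1 0 - PySem.List.pyGetD (a :: b :: t) 0 0)
          ((a :: b :: t) :: rs) = pvF (pvDiffs series)
      have hflat : pvDiffs series = (b - a) :: (pvRunDiffs (b :: t) ++ rs.flatMap pvRunDiffs) := by
        rw [hd, hruns]; rfl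
      have hall : ∀ (r : List Int),
          (decide (r = pvAP r (b - a))) = (pvRunDiffs r).all (· == (b - a)) := by
        intro r
        cases hc : (pvRunDiffs r).all (· == (b - a)) with
        | true => exact decide_eq_true ((ap_iff r (b - a)).mpr hc)
        | false =>
          refine decide_eq_false (fun he => ?_)
          rw [(ap_iff r (b - a)).mp he] at hc
          cases hc
      have hLall : (((a :: b :: t) :: rs).all (fun r => decide (r = pvAP r (b - a))))
          = ((pvRunDiffs (b :: t) ++ rs.flatMap pvRunDiffs).all (· == (b - a))) := by
        rw [List.all_append, List.all_flatMap, List.all_cons]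
        simp only [hall]
        show ((pvRunDiffs (a :: b :: t)).all (· == (b - a)) && _) = _
        simp [pvRunDiffs]
      rw [hdval, pvCheckB_eq, hflat]
      simp only [pvF]
      rw [hLall]

-- ===== VERDICT (by name: the statement is the Claim_ definition above) =====
theorem detect_arithmetic_spec : Claim_equal_detect_arithmetic := by
  intro series _
  unfold Spec_detect_arithmetic
  rw [A_eq_F, B_eq_F]
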